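-- pv_equiv track=rewrite | github.com/anatom3000/MathParser | human_math/parser/processors.py | get_coupled_token_levels
-- ===== SOURCE A (Python) =====
-- from collections.abc import MutableSequence, Iterable, Sequence
-- from itertools import chain
-- from typing import Optional, Type
--
-- def get_coupled_token_levels(opening_parentheses_indexes: Iterable[int],
--                              closing_parentheses_indexes: Iterable[int],
--                              tokens: Optional[Iterable[int]] = None) \
--         -> dict[int, int]:
--     if tokens is None:
--         tokens = chain(opening_parentheses_indexes, closing_parentheses_indexes)
--
--     tokens = list(tokens)
--
--     levels = {}
--     nesting_level = 0
--     for p in sorted(set(chain(opening_parentheses_indexes, closing_parentheses_indexes, tokens))):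
--         if p in closing_parentheses_indexes:
--             nesting_level -= 1
--
--         if p in tokens:
--             levels[p] = nesting_level
--
--         if p in opening_parentheses_indexes:
--             nesting_level += 1
--
--     return levels
-- ===== SOURCE B (Python) =====
-- def get_coupled_token_levels(opening_parentheses_indexes,
--                              closing_parentheses_indexes,
--                              tokens=None):
--     openings = set(opening_parentheses_indexes)
--     closings = set(closing_parentheses_indexes)
--     keys = openings | closings if tokens is None else set(tokens)
--     return {p: sum(1 for o in openings if o < p) - sum(1 for c in closings if c <= p)
--             for p in sorted(keys)}
-- ===== Notes on version B (the rewrite author's own statement) =====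
-- stated objective: alternative
-- what changed: Replaces A's single stateful sweep over the sorted union with a running nesting counter by computing each token's level independently as an order-statistic count: (# distinct openings < p) - (# distinct closings <= p) over sorted(set(keys)).
import Mathlib
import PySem

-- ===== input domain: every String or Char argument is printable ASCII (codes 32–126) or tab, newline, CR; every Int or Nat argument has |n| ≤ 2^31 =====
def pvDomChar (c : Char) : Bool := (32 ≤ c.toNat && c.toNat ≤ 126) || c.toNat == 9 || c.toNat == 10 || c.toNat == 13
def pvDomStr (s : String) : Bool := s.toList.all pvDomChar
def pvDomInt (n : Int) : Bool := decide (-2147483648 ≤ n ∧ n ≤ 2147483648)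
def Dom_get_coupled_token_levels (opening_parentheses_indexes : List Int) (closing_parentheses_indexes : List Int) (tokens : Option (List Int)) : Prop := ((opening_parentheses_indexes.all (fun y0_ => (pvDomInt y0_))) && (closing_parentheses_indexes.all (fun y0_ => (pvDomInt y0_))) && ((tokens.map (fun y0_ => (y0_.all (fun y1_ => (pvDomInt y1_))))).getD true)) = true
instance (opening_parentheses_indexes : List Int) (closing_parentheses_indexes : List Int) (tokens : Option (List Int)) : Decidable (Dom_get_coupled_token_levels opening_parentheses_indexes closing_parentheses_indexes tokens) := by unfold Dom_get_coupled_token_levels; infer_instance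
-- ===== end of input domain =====

-- B replaces A's stateful sorted-union sweep with a running nesting counter by an independent
-- per-token order-statistic count (openings strictly below minus closings at or below each token);
-- objective: alternative decomposition of equal cost. Equivalence of the RETURN value is proved.

-- ===== PORT A =====
-- the loop body of A's 'for p in sorted(set(chain(...)))' sweep, state = (levels dict, nesting_level)
def aStep (opening_parentheses_indexes : List Int) (closing_parentheses_indexes : List Int)
    (tks : List Int) (s : PySem.Dict Int Int × Int) (p : Int) : PySem.Dict Int Int × Int :=
  let lvl1 := if closing_parentheses_indexes.contains p then s.2 - 1 else s.2
  let d1 := if tks.contains p then s.1.insert p lvl1 else s.1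
  let lvl2 := if opening_parentheses_indexes.contains p then lvl1 + 1 else lvl1
  (d1, lvl2)

def get_coupled_token_levels (opening_parentheses_indexes : List Int) (closing_parentheses_indexes : List Int) (tokens : Option (List Int)) : List (Int × Int) :=
  let tks : List Int := match tokens with
    | none => opening_parentheses_indexes ++ closing_parentheses_indexes   -- chain(opening, closing)
    | some t => t
  let ps := PySem.List.sorted (PySem.Set.ofList (opening_parentheses_indexes ++ closing_parentheses_indexes ++ tks)) (fun x => x)
  (ps.foldl (aStep opening_parentheses_indexes closing_parentheses_indexes tks) (PySem.Dict.empty, 0)).1.items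

-- ===== PORT B =====
def get_coupled_token_levels_alt (opening_parentheses_indexes : List Int) (closing_parentheses_indexes : List Int) (tokens : Option (List Int)) : List (Int × Int) :=
  let openings := PySem.Set.ofList opening_parentheses_indexes
  let closings := PySem.Set.ofList closing_parentheses_indexes
  let keys : PySem.Set Int := match tokens with
    | none => PySem.Set.union openings closings
    | some t => PySem.Set.ofList t
  (PySem.List.sorted keys (fun x => x)).map
    (fun p => (p, (openings.countP (fun o => decide (o < p)) : Int)
                  - (closings.countP (fun c => decide (c ≤ p)) : Int)))

-- ===== PRECONDITION & SPEC =====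
def Spec_get_coupled_token_levels (opening_parentheses_indexes : List Int) (closing_parentheses_indexes : List Int) (tokens : Option (List Int)) (out : List (Int × Int)) : Prop := out = get_coupled_token_levels_alt opening_parentheses_indexes closing_parentheses_indexes tokens
instance (opening_parentheses_indexes : List Int) (closing_parentheses_indexes : List Int) (tokens : Option (List Int)) (out : List (Int × Int)) : Decidable (Spec_get_coupled_token_levels opening_parentheses_indexes closing_parentheses_indexes tokens out) := by unfold Spec_get_coupled_token_levels; infer_instance

-- ===== CLAIM (what is proved, stated in full; the proofs are below) =====
def Claim_equal_get_coupled_token_levels : Prop := ∀ (opening_parentheses_indexes : List Int) (closing_parentheses_indexes : List Int) (tokens : Option (List Int)), Dom_get_coupled_token_levels opening_parentheses_indexes closing_parentheses_indexes tokens → Spec_get_coupled_token_levels opening_parentheses_indexes closing_parentheses_indexes tokens (get_coupled_token_levels opening_parentheses_indexes closing_parentheses_indexes tokens)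

-- ===== LEMMAS AND PROOFS =====

-- counting '≤ p' over a duplicate-free list splits into '< p' plus one hit at p itself
lemma countP_le_split (C : List Int) (hnd : C.Nodup) (p : Int) :
    C.countP (fun x => decide (x ≤ p)) = C.countP (fun x => decide (x < p)) + (if p ∈ C then 1 else 0) := by
  induction C with
  | nil => simp
  | cons c t ih =>
    rw [List.nodup_cons] at hnd
    rcases eq_or_ne c p with rfl | h
    · simp [ih hnd.2, hnd.1]
    · have h' : p ∈ c :: t ↔ p ∈ t := by simp [h.symm]
      by_cases hx : c ≤ p
      · have hx' : c < p := lt_of_le_of_ne hx h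
        simp [ih hnd.2, hx, hx', h']
        split_ifs <;> omega
      · have hx' : ¬ c < p := fun hc => hx hc.le
        simp [ih hnd.2, hx, hx', h']

-- the invariant-carrying characterisation of A's sweep over the strictly sorted suffix ps
lemma loop_items (op cl tks : List Int) :
    ∀ (ps : List Int), ps.Pairwise (· < ·) →
    (∀ x : Int, (x ∈ op ∨ x ∈ cl) → x ∉ ps → ∀ q ∈ ps, x < q) →
    ∀ (d : PySem.Dict Int Int), (∀ q ∈ ps, d.contains q = false) →
    ∀ (lvl : Int),
      lvl = ((PySem.Set.ofList op).countP (fun x => !ps.contains x) : Int)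
          - ((PySem.Set.ofList cl).countP (fun x => !ps.contains x) : Int) →
    (ps.foldl (aStep op cl tks) (d, lvl)).1.items
      = d.items ++ (ps.filter (fun p => tks.contains p)).map
          (fun p => (p, ((PySem.Set.ofList op).countP (fun o => decide (o < p)) : Int)
                        - ((PySem.Set.ofList cl).countP (fun c => decide (c ≤ p)) : Int))) := by
  intro ps
  induction ps with
  | nil => intro _ _ d _ lvl _; simp
  | cons p rest ih =>
    intro hs hcov d hd lvl hlvl
    rw [List.pairwise_cons] at hs
    obtain ⟨hp, hrest⟩ := hs
    -- counting over the unprocessed suffix vs. order counts at p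
    have key : ∀ (L : List Int), (∀ x ∈ L, x ∈ op ∨ x ∈ cl) →
        L.countP (fun x => !((p :: rest).contains x)) = L.countP (fun x => decide (x < p)) := by
      intro L hL
      apply List.countP_congr
      intro x hx
      simp only [List.contains_eq_mem, Bool.not_eq_eq_eq_not, Bool.not_true, decide_eq_true_eq,
        decide_eq_false_iff_not, List.mem_cons, not_or, decide_eq_true_eq]
      constructor
      · intro hni
        exact hcov x (hL x hx) (by simp [List.mem_cons, hni.1, hni.2]) p (by simp)
      · intro hlt
        refine ⟨fun he => by omega, fun hr => ?_⟩
        exact absurd (hp x hr) (by omega)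
    have key2 : ∀ (L : List Int), (∀ x ∈ L, x ∈ op ∨ x ∈ cl) →
        L.countP (fun x => !(rest.contains x)) = L.countP (fun x => decide (x ≤ p)) := by
      intro L hL
      apply List.countP_congr
      intro x hx
      simp only [List.contains_eq_mem, Bool.not_eq_eq_eq_not, Bool.not_true,
        decide_eq_false_iff_not, decide_eq_true_eq]
      constructor
      · intro hni
        by_cases hxp : x = p
        · omega
        · by_cases hxps : x ∈ p :: rest
          · rcases List.mem_cons.mp hxps with h | h
            · omega
            · exact absurd h hni
          · exact le_of_lt (hcov x (hL x hx) hxps p (by simp))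
      · intro hle hr
        exact absurd (hp x hr) (by omega)
    have hLop : ∀ x ∈ PySem.Set.ofList op, x ∈ op ∨ x ∈ cl := fun x hx =>
      Or.inl ((PySem.Set.mem_ofList op x).mp hx)
    have hLcl : ∀ x ∈ PySem.Set.ofList cl, x ∈ op ∨ x ∈ cl := fun x hx =>
      Or.inr ((PySem.Set.mem_ofList cl x).mp hx)
    -- the recorded level at p
    have hmemO : p ∈ PySem.Set.ofList op ↔ p ∈ op := PySem.Set.mem_ofList op p
    have hmemC : p ∈ PySem.Set.ofList cl ↔ p ∈ cl := PySem.Set.mem_ofList cl p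
    have hsplitO := countP_le_split (PySem.Set.ofList op) (PySem.Set.nodup_ofList op) p
    have hsplitC := countP_le_split (PySem.Set.ofList cl) (PySem.Set.nodup_ofList cl) p
    have hlvl1 : (if cl.contains p then lvl - 1 else lvl)
        = ((PySem.Set.ofList op).countP (fun o => decide (o < p)) : Int)
          - ((PySem.Set.ofList cl).countP (fun c => decide (c ≤ p)) : Int) := by
      rw [hlvl, key _ hLop, key _ hLcl, hsplitC]
      simp only [List.contains_eq_mem, decide_eq_true_eq, hmemC]
      split_ifs <;> push_cast <;> ring
    set lvl1 := if cl.contains p then lvl - 1 else lvl with hlvl1def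
    -- unfold one step of the fold
    have hfold : (p :: rest).foldl (aStep op cl tks) (d, lvl) =
        rest.foldl (aStep op cl tks)
          ((if tks.contains p then d.insert p lvl1 else d),
           (if op.contains p then lvl1 + 1 else lvl1)) := by
      simp [List.foldl_cons, aStep, hlvl1def]
    rw [hfold]
    have hdp : d.contains p = false := hd p (by simp)
    have hd' : ∀ q ∈ rest, (if tks.contains p then d.insert p lvl1 else d).contains q = false := by
      intro q hq
      have hqp : (q == p) = false := by
        have := hp q hq; simp; omega
      split_ifs with h
      · rw [PySem.Dict.contains_insert, hqp, hd q (by simp [hq])]; rfl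
      · exact hd q (by simp [hq])
    have hlvl2 : (if op.contains p then lvl1 + 1 else lvl1)
        = ((PySem.Set.ofList op).countP (fun x => !rest.contains x) : Int)
          - ((PySem.Set.ofList cl).countP (fun x => !rest.contains x) : Int) := by
      rw [hlvl1def, hlvl, key _ hLop, key _ hLcl, key2 _ hLop, key2 _ hLcl, hsplitO, hsplitC]
      simp only [List.contains_eq_mem, decide_eq_true_eq, hmemO, hmemC]
      split_ifs <;> push_cast <;> ring
    have hcov' : ∀ x : Int, (x ∈ op ∨ x ∈ cl) → x ∉ rest → ∀ q ∈ rest, x < q := by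
      intro x hx hnr q hq
      by_cases hxp : x = p
      · subst hxp; exact hp q hq
      · exact hcov x hx (by simp [hxp, hnr]) q (by simp [hq])
    rw [ih hrest hcov' _ hd' _ hlvl2]
    -- stitch the recorded entry for p back on
    rw [List.filter_cons]
    split_ifs with h
    · rw [PySem.Dict.items_insert_of_not_contains d lvl1 hdp]
      simp [hlvl1]
    · simp

-- two duplicate-free lists with the same members are permutations, hence the same sorted list
lemma sorted_eq_filter (keys : List Int) (hk : keys.Nodup) (f : List Int) (hf : f.Nodup)
    (hfs : f.Pairwise (· < ·)) (hmem : ∀ x : Int, x ∈ f ↔ x ∈ keys) :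
    PySem.List.sorted keys (fun x => x) = f := by
  apply PySem.List.sorted_eq_of_perm_of_pairwise_lt
  · exact List.perm_of_nodup_nodup_toFinset_eq hf hk (by ext a; simp [hmem])
  · exact hfs


-- both ports computed against the shared sorted union; keys abstracts B's key set per tokens case
lemma ports_agree (op cl tks : List Int) (keys : PySem.Set Int) (hk : List.Nodup keys)
    (hmemk : ∀ x : Int, x ∈ keys ↔ x ∈ tks) :
    (List.foldl (aStep op cl tks) (PySem.Dict.empty, 0)
      (PySem.List.sorted (PySem.Set.ofList (op ++ cl ++ tks)) (fun x => x))).1.items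
    = (PySem.List.sorted keys (fun x => x)).map
        (fun p => (p, ((PySem.Set.ofList op).countP (fun o => decide (o < p)) : Int)
                      - ((PySem.Set.ofList cl).countP (fun c => decide (c ≤ p)) : Int))) := by
  set ps := PySem.List.sorted (PySem.Set.ofList (op ++ cl ++ tks)) (fun x => x) with hps
  have hmem_ps : ∀ x : Int, x ∈ ps ↔ (x ∈ op ∨ x ∈ cl ∨ x ∈ tks) := by
    intro x
    rw [hps, PySem.List.mem_sorted, PySem.Set.mem_ofList]
    simp [List.mem_append]
  have hsort : ps.Pairwise (· < ·) := PySem.List.sorted_ofList_pairwise_lt _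
  have hnodup : ps.Nodup := hsort.imp (fun h => ne_of_lt h)
  have hcov : ∀ x : Int, (x ∈ op ∨ x ∈ cl) → x ∉ ps → ∀ q ∈ ps, x < q := by
    intro x hx hnx q _
    exact absurd ((hmem_ps x).mpr (by tauto)) hnx
  have hd0 : ∀ q ∈ ps, (PySem.Dict.empty (κ := Int) (ν := Int)).contains q = false := by
    intro q _; rfl
  have hlvl0 : (0 : Int) = ((PySem.Set.ofList op).countP (fun x => !ps.contains x) : Int)
      - ((PySem.Set.ofList cl).countP (fun x => !ps.contains x) : Int) := by
    have hz : ∀ (L : List Int), (∀ x ∈ L, x ∈ ps) → L.countP (fun x => !ps.contains x) = 0 := by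
      intro L hL
      rw [List.countP_eq_zero]
      intro x hx
      simp [List.contains_eq_mem, hL x hx]
    rw [hz _ (fun x hx => (hmem_ps x).mpr (Or.inl ((PySem.Set.mem_ofList op x).mp hx))),
        hz _ (fun x hx => (hmem_ps x).mpr (Or.inr (Or.inl ((PySem.Set.mem_ofList cl x).mp hx))))]
    simp
  rw [loop_items op cl tks ps hsort hcov _ hd0 0 hlvl0]
  have hkeys : PySem.List.sorted keys (fun x => x) = ps.filter (fun p => tks.contains p) := by
    apply sorted_eq_filter keys hk _ (hnodup.filter _) (hsort.filter _)
    intro x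
    rw [List.mem_filter, hmemk]
    simp only [List.contains_eq_mem, decide_eq_true_eq]
    constructor
    · exact fun h => h.2
    · exact fun h => ⟨(hmem_ps x).mpr (Or.inr (Or.inr h)), h⟩
  rw [hkeys]
  rfl

-- ===== VERDICT (by name: the statement is the Claim_ definition above) =====
theorem get_coupled_token_levels_spec : Claim_equal_get_coupled_token_levels := by
  intro op cl tokens _
  unfold Spec_get_coupled_token_levels get_coupled_token_levels get_coupled_token_levels_alt
  cases tokens with
  | none =>
    exact ports_agree op cl (op ++ cl)
      (PySem.Set.union (PySem.Set.ofList op) (PySem.Set.ofList cl))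
      (PySem.Set.nodup_union _ _ (PySem.Set.nodup_ofList op))
      (fun x => by
        rw [PySem.Set.mem_union, PySem.Set.mem_ofList, PySem.Set.mem_ofList, List.mem_append])
  | some t =>
    exact ports_agree op cl t (PySem.Set.ofList t) (PySem.Set.nodup_ofList t)
      (fun x => PySem.Set.mem_ofList t x)
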